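-- pv_equiv track=rewrite | github.com/paiml/depyler | examples/hard_array_shuffle.py | fisher_yates_shuffle
-- ===== SOURCE A (Python) =====
-- def fisher_yates_shuffle(arr: list[int], seed: int) -> list[int]:
--     """Deterministic Fisher-Yates shuffle with seed."""
--     result: list[int] = []
--     i: int = 0
--     n: int = len(arr)
--     while i < n:
--         result.append(arr[i])
--         i = i + 1
--     s: int = seed
--     i = n - 1
--     while i > 0:
--         s = s * 1103515245 + 12345
--         j_val: int = s % 32768
--         if j_val < 0:
--             j_val = -j_val
--         j: int = j_val % (i + 1)
--         tmp: int = result[i]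
--         result[i] = result[j]
--         result[j] = tmp
--         i = i - 1
--     return result
-- ===== SOURCE B (Python) =====
-- def fisher_yates_shuffle(arr: list[int], seed: int) -> list[int]:
--     """Deterministic seeded shuffle: build the output back-to-front by extracting
--     the chosen element from a shrinking pool (replace-with-last, then pop)."""
--     pool = list(arr)
--     picked = []
--     s = seed
--     for i in range(len(arr) - 1, 0, -1):
--         s = s * 1103515245 + 12345
--         j = (s % 32768) % (i + 1)
--         picked.append(pool[j])
--         pool[j] = pool[-1]
--         pool.pop()
--     picked.reverse()
--     return pool + picked
-- ===== Notes on version B (the rewrite author's own statement) =====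
-- stated objective: alternative
-- what changed: B builds the shuffled list back-to-front by extracting each chosen element from a shrinking pool (overwrite with the last element, then pop), instead of A's in-place swap loop over a full element-by-element copy; the redundant negativity test on the modulus is dropped since Python's % is nonnegative here.
import Mathlib
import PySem

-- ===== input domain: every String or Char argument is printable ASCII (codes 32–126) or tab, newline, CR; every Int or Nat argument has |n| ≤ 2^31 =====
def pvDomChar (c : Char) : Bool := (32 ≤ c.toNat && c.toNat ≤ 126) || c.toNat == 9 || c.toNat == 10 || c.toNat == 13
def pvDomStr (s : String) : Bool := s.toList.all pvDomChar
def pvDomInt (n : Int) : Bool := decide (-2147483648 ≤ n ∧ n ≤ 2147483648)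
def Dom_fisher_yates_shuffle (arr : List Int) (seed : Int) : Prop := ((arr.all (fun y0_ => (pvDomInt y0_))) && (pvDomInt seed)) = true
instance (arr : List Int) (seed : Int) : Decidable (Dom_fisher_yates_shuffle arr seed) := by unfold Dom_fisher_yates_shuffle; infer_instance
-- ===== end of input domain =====

-- B builds the output back-to-front by extracting each chosen element from a shrinking pool
-- (replace-with-last, then pop) instead of A's in-place swap loop over a full copy (alternative, same cost).

-- ===== PORT A =====
-- result[i]/result[j] reads and writes: indices are provably in range in A, ported with the total pyGetD/pySetD forms (exact here).
def pvSwapA (l : List Int) (i j : Int) : List Int :=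
  let tmp := PySem.List.pyGetD l i 0
  let l1 := PySem.List.pySetD l i (PySem.List.pyGetD l j 0)
  PySem.List.pySetD l1 j tmp

-- the second while loop of A, with fuel = the current value of i (counts down to 0)
def pvLoopA : Nat → List Int → Int → List Int
  | 0, l, _ => l
  | i+1, l, s =>
    let s' := s * 1103515245 + 12345
    let jv := PySem.Int.mod s' 32768
    let jv' := if jv < 0 then -jv else jv
    let j := PySem.Int.mod jv' ((i : Int) + 2)
    pvLoopA i (pvSwapA l ((i : Int) + 1) j) s'

def fisher_yates_shuffle (arr : List Int) (seed : Int) : List Int :=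
  let n : Int := arr.length
  -- first while loop: result.append(arr[i]) for i = 0..n-1
  let result := (PySem.List.pyRange 0 n 1).foldl (fun r i => r ++ [PySem.List.pyGetD arr i 0]) []
  pvLoopA (n - 1).toNat result seed

-- ===== PORT B =====
-- Source B's for-loop over range(n-1, 0, -1), as structural recursion on i (fuel i = current index);
-- state is (pool, picked, s).  pool[j] / pool[-1] are exact via pyGetD (indices in range),
-- pool.pop() discarding its value is pool.dropLast (exact: pool is nonempty there).
def pvLoopB : Nat → List Int → List Int → Int → List Int × List Int
  | 0, pool, picked, _ => (pool, picked)
  | i+1, pool, picked, s =>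
    let s' := s * 1103515245 + 12345
    let j := PySem.Int.mod (PySem.Int.mod s' 32768) ((i : Int) + 2)
    let x := PySem.List.pyGetD pool j 0
    let pool' := (PySem.List.pySetD pool j (PySem.List.pyGetD pool (-1) 0)).dropLast
    pvLoopB i pool' (picked ++ [x]) s'

def fisher_yates_shuffle_alt (arr : List Int) (seed : Int) : List Int :=
  let st := pvLoopB (arr.length - 1) arr [] seed
  st.1 ++ st.2.reverse

-- ===== PRECONDITION & SPEC =====
def Spec_fisher_yates_shuffle (arr : List Int) (seed : Int) (out : List Int) : Prop := out = fisher_yates_shuffle_alt arr seed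
instance (arr : List Int) (seed : Int) (out : List Int) : Decidable (Spec_fisher_yates_shuffle arr seed out) := by unfold Spec_fisher_yates_shuffle; infer_instance

-- ===== CLAIM (what is proved, stated in full; the proofs are below) =====
def Claim_equal_fisher_yates_shuffle : Prop := ∀ (arr : List Int) (seed : Int), Dom_fisher_yates_shuffle arr seed → Spec_fisher_yates_shuffle arr seed (fisher_yates_shuffle arr seed)

-- ===== LEMMAS AND PROOFS =====

lemma pvCopy_eq (arr : List Int) :
    (PySem.List.pyRange 0 (arr.length : Int) 1).foldl (fun r i => r ++ [PySem.List.pyGetD arr i 0]) [] = arr := by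
  rw [PySem.List.foldl_append_singleton_eq_map]
  exact PySem.List.map_pyGetD_pyRange_zero' arr 0

-- A's swap of the last position (i+1) of pool with position j equals: drop the last element,
-- after writing pool's last element into slot j, and append the old pool[j].
lemma pvSwapA_pool (pool rest : List Int) (i : Nat) (j : Int)
    (hlen : pool.length = i + 2) (hj0 : 0 ≤ j) (hj : j < (i : Int) + 2) :
    pvSwapA (pool ++ rest) ((i : Int) + 1) j =
      ((PySem.List.pySetD pool j (PySem.List.pyGetD pool (-1) 0)).dropLast
        ++ [PySem.List.pyGetD pool j 0]) ++ rest := by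
  have hpool : pool ≠ [] := by intro h; simp [h] at hlen
  have hjn : j.toNat < pool.length := by omega
  have hi1 : i + 1 < pool.length := by omega
  -- rewrite all pyGetD/pySetD into set/getElem form
  have hgj : PySem.List.pyGetD (pool ++ rest) j 0 = pool[j.toNat] := by
    rw [PySem.List.pyGetD_eq_getElem _ _ hj0 (by simp; omega)]
    exact List.getElem_append_left _
  have hgi : PySem.List.pyGetD (pool ++ rest) ((i : Int) + 1) 0 = pool[i+1] := by
    rw [show ((i : Int) + 1) = ((i + 1 : Nat) : Int) by push_cast; ring,
      PySem.List.pyGetD_eq_getElem _ _ (by positivity) (by simp; omega)]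
    simp only [Int.toNat_natCast]
    exact List.getElem_append_left _
  have hglast : PySem.List.pyGetD pool (-1) 0 = pool[i+1] := by
    rw [PySem.List.pyGetD_neg_one _ _ hpool, List.getLast_eq_getElem]
    simp [hlen]
  simp only [pvSwapA, hgj, hgi, hglast,
    PySem.List.pySetD_of_nonneg _ _ hj0,
    PySem.List.pySetD_of_nonneg _ _ (show (0:Int) ≤ (i:Int)+1 by positivity)]
  have hti : ((i : Int) + 1).toNat = i + 1 := by omega
  rw [hti, PySem.List.pyGetD_eq_getElem _ _ hj0 (by omega),
    List.set_append_left _ _ (by omega),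
    List.set_append_left _ _ (by simp; omega)]
  congr 1
  apply List.ext_getElem
  · simp [hlen]
  · intro k hk1 hk2
    simp only [List.length_set, hlen] at hk1
    by_cases hkj : k = j.toNat
    · subst hkj
      by_cases hke : j.toNat = i + 1
      · simp [List.getElem_set, hke, List.getElem_append,
          List.getElem_dropLast, hlen]
      · have hklt : j.toNat < i + 1 := by omega
        simp [List.getElem_set, hke, List.getElem_append,
          List.getElem_dropLast, List.length_set, hlen, hklt, Ne.symm hke]
    · by_cases hki : k = i + 1
      · subst hki
        simp [List.getElem_set, Ne.symm hkj, List.getElem_append,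
          List.getElem_dropLast, List.length_set, hlen, hkj]
      · have hklt : k < i + 1 := by omega
        simp [List.getElem_set, hkj, hki, List.getElem_append,
          List.getElem_dropLast, List.length_set, hlen, hklt, Ne.symm hki]

lemma pvLoopB_length : ∀ (i : Nat) (pool picked : List Int) (s : Int),
    pool.length = i + 1 → (pvLoopB i pool picked s).1.length = 1
  | 0, pool, picked, s, h => by simpa [pvLoopB] using h
  | i+1, pool, picked, s, h => by
    simp only [pvLoopB]
    exact pvLoopB_length i _ _ _ (by simp [PySem.List.length_pySetD]; omega)

-- main invariant: A's swap loop on pool ++ picked.reverse equals B's extraction loop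
lemma pvLoop_eq : ∀ (i : Nat) (pool picked : List Int) (s : Int),
    pool.length = i + 1 →
    pvLoopA i (pool ++ picked.reverse) s =
      (pvLoopB i pool picked s).1 ++ (pvLoopB i pool picked s).2.reverse
  | 0, pool, picked, s, _ => by simp [pvLoopA, pvLoopB]
  | i+1, pool, picked, s, hlen => by
    simp only [pvLoopA, pvLoopB]
    set s' := s * 1103515245 + 12345 with hs'
    have hjv0 : 0 ≤ PySem.Int.mod s' 32768 := by
      rw [PySem.Int.mod_eq_emod_of_pos (by omega)]
      exact Int.emod_nonneg _ (by omega)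
    have hjnneg : ¬ PySem.Int.mod s' 32768 < 0 := not_lt.mpr hjv0
    set j := PySem.Int.mod (PySem.Int.mod s' 32768) ((i : Int) + 2) with hj
    have hj0 : 0 ≤ j := by
      rw [hj, PySem.Int.mod_eq_emod_of_pos (by omega)]
      exact Int.emod_nonneg _ (by omega)
    have hjlt : j < (i : Int) + 2 := by
      rw [hj, PySem.Int.mod_eq_emod_of_pos (by omega)]
      exact Int.emod_lt_of_pos _ (by omega)
    rw [if_neg hjnneg]
    rw [pvSwapA_pool pool picked.reverse i j hlen hj0 hjlt]
    have := pvLoop_eq i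
      ((PySem.List.pySetD pool j (PySem.List.pyGetD pool (-1) 0)).dropLast)
      (picked ++ [PySem.List.pyGetD pool j 0]) s'
      (by simp [PySem.List.length_pySetD]; omega)
    simpa using this

-- ===== VERDICT (by name: the statement is the Claim_ definition above) =====
theorem fisher_yates_shuffle_spec : Claim_equal_fisher_yates_shuffle := by
  intro arr seed _
  unfold Spec_fisher_yates_shuffle fisher_yates_shuffle fisher_yates_shuffle_alt
  simp only [pvCopy_eq]
  cases arr with
  | nil => simp [pvLoopA, pvLoopB]
  | cons a as =>
    have hlen : (a :: as).length = as.length + 1 := by simp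
    have ht : (((a :: as).length : Int) - 1).toNat = as.length := by simp
    have ht2 : (a :: as).length - 1 = as.length := by simp
    rw [ht, ht2]
    have := pvLoop_eq as.length (a :: as) [] seed hlen
    simpa using this
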